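-- pv_equiv track=rewrite | github.com/Ziga12341/Advent-of-Code-2023 | python/Day 14/first_part.py | count_number_of_total_load_in_line
-- ===== SOURCE A (Python) =====
-- def count_number_of_total_load_in_line(converted_line: str) -> int:
--     count_load = 0
--     converted_line = list(converted_line)
--     i_while = 0
--     while i_while < len(converted_line):
--         i = 0
--         while i < len(converted_line):
--             if converted_line[i] == "O":
--                 #
--                 if converted_line[i - 1] != "#" and converted_line[i - 1] != "O" and i != 0:
--                     converted_line[i - 1] = "O"
--                     converted_line[i] = "."
--             i += 1
--         i_while += 1
--
--     for for_i, char in enumerate(converted_line):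
--         if char == "O":
--             count_load += len(converted_line) - for_i
--     return count_load
-- ===== SOURCE B (Python) =====
-- def count_number_of_total_load_in_line(converted_line: str) -> int:
--     n = len(converted_line)
--     total = 0
--     slot = 0
--     for i, ch in enumerate(converted_line):
--         if ch == '#':
--             slot = i + 1
--         elif ch == 'O':
--             total += n - slot
--             slot += 1
--     return total
-- ===== Notes on version B (the rewrite author's own statement) =====
-- stated objective: faster
-- what changed: A bubbles each rock left one cell per sweep and repeats the sweep len(line) times before summing loads; B makes one pass tracking the next free slot after the last '#' or settled rock and adds each rock's load directly.
import Mathlib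
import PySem

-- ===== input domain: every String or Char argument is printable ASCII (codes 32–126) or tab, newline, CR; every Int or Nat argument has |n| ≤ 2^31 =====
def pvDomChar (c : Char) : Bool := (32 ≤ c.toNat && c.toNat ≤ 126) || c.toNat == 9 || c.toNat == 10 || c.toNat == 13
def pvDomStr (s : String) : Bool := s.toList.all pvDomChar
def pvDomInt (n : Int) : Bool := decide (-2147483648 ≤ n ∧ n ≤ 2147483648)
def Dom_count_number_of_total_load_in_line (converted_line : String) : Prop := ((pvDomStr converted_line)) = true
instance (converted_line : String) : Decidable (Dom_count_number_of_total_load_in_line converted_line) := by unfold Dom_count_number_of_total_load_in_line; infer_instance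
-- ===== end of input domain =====

-- B replaces A's quadratic repeated bubble-sweep settling of rocks by a single pass that
-- tracks the next free slot after the last '#' or settled rock (objective: faster).


-- ===== PORT A =====
-- one step of A's inner while loop: at index i, if line[i] == 'O' and line[i-1] is neither
-- '#' nor 'O' and i != 0, move the rock one cell left (line[i-1] read with Python indexing)
def pvAStep (l : List Char) (i : Nat) : List Char :=
  if PySem.List.pyGet? l (i : Int) = some 'O' ∧
     PySem.List.pyGet? l ((i : Int) - 1) ≠ some '#' ∧
     PySem.List.pyGet? l ((i : Int) - 1) ≠ some 'O' ∧ i ≠ 0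
  then (l.set (i - 1) 'O').set i '.'
  else l

-- A's inner while loop: i = 0 .. len-1
def pvAInner (l : List Char) : List Char := (List.range l.length).foldl pvAStep l

-- A's outer while loop: the inner sweep repeated len(line) times (length is preserved)
def pvAOuter (l : List Char) : List Char := (List.range l.length).foldl (fun acc _ => pvAInner acc) l

def count_number_of_total_load_in_line (converted_line : String) : Int :=
  let l := pvAOuter converted_line.toList
  (PySem.List.enumerate l 0).foldl
    (fun acc p => if p.2 = 'O' then acc + ((l.length : Int) - p.1) else acc) 0

-- ===== PORT B =====
-- single pass with state (total, slot): '#' sets slot to i+1, 'O' adds n - slot and bumps slot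
def count_number_of_total_load_in_line_alt (converted_line : String) : Int :=
  let cs := converted_line.toList
  let n : Int := cs.length
  ((PySem.List.enumerate cs 0).foldl
    (fun st p =>
      if p.2 = '#' then (st.1, p.1 + 1)
      else if p.2 = 'O' then (st.1 + (n - st.2), st.2 + 1)
      else st) ((0 : Int), (0 : Int))).1

-- ===== PRECONDITION & SPEC =====
def Spec_count_number_of_total_load_in_line (converted_line : String) (out : Int) : Prop := out = count_number_of_total_load_in_line_alt converted_line
instance (converted_line : String) (out : Int) : Decidable (Spec_count_number_of_total_load_in_line converted_line out) := by unfold Spec_count_number_of_total_load_in_line; infer_instance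

-- ===== CLAIM (what is proved, stated in full; the proofs are below) =====
def Claim_equal_count_number_of_total_load_in_line : Prop := ∀ (converted_line : String), Dom_count_number_of_total_load_in_line converted_line → Spec_count_number_of_total_load_in_line converted_line (count_number_of_total_load_in_line converted_line)

-- ===== LEMMAS AND PROOFS =====

-- structural form of one inner sweep: pvGo carries the (already final) previous character
def pvGo : Char → List Char → List Char
  | h, [] => [h]
  | h, c :: m => if c = 'O' ∧ h ≠ '#' ∧ h ≠ 'O' then 'O' :: pvGo '.' m else h :: pvGo c m

def pvPass : List Char → List Char
  | [] => []
  | c :: m => pvGo c m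

-- is there an 'O' before the first '#'?
def pvHasO : List Char → Bool
  | [] => false
  | c :: m => if c = '#' then false else if c = 'O' then true else pvHasO m

-- replace every char up to and including the first 'O' by '.'
def pvClear : List Char → List Char
  | [] => []
  | c :: m => if c = 'O' then '.' :: m else '.' :: pvClear m

lemma pvClear_length : ∀ l : List Char, (pvClear l).length = l.length := by
  intro l; induction l with
  | nil => rfl
  | cons c m ih => by_cases h : c = 'O' <;> simp [pvClear, h, ih]

-- the fully settled configuration (the fixpoint A's outer loop reaches)
def pvSettle : List Char → List Char
  | [] => []
  | c :: m =>
    if c = '#' ∨ c = 'O' then c :: pvSettle m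
    else if pvHasO m then 'O' :: pvSettle (pvClear m)
    else c :: pvSettle m
termination_by l => l.length
decreasing_by
  · simp
  · simp [pvClear_length]
  · simp

-- remaining-travel measure: max over rocks of the number of passable cells before it in its segment
def pvPhi : Nat → List Char → Nat
  | _, [] => 0
  | c, x :: m => if x = '#' then pvPhi 0 m else if x = 'O' then max c (pvPhi c m) else pvPhi (c + 1) m

-- loads of a (settled) line, walking positions
def pvLoad (n : Int) : Int → List Char → Int
  | _, [] => 0
  | i, c :: m => (if c = 'O' then n - i else 0) + pvLoad n (i + 1) m

-- structural form of B's single pass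
def pvBF (n : Int) : Int → Int → List Char → Int
  | _, _, [] => 0
  | i, slot, c :: m =>
    if c = '#' then pvBF n (i + 1) (i + 1) m
    else if c = 'O' then (n - slot) + pvBF n (i + 1) (slot + 1) m
    else pvBF n (i + 1) slot m

-- ---- equation lemmas ----
lemma pass_nil : pvPass [] = [] := rfl

lemma pass_single (x : Char) : pvPass [x] = [x] := by simp [pvPass, pvGo]

lemma pass_cons_O (m : List Char) : pvPass ('O' :: m) = 'O' :: pvPass m := by
  cases m with
  | nil => rfl
  | cons c m' => simp [pvPass, pvGo]

lemma pass_cons_hash (m : List Char) : pvPass ('#' :: m) = '#' :: pvPass m := by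
  cases m with
  | nil => rfl
  | cons c m' => simp [pvPass, pvGo]

lemma pass_swap {x : Char} (hx1 : x ≠ '#') (hx2 : x ≠ 'O') (m : List Char) :
    pvPass (x :: 'O' :: m) = 'O' :: pvPass ('.' :: m) := by
  simp [pvPass, pvGo, hx1, hx2]

lemma pass_skip {c : Char} (hc : c ≠ 'O') (x : Char) (m : List Char) :
    pvPass (x :: c :: m) = x :: pvPass (c :: m) := by
  simp [pvPass, pvGo, hc]

lemma pass_length : ∀ l : List Char, (pvPass l).length = l.length := by
  have go : ∀ (m : List Char) (h : Char), (pvGo h m).length = m.length + 1 := by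
    intro m; induction m with
    | nil => intro h; rfl
    | cons c m' ih =>
      intro h
      by_cases hsw : c = 'O' ∧ h ≠ '#' ∧ h ≠ 'O' <;> simp [pvGo, hsw, ih]
  intro l; cases l with
  | nil => rfl
  | cons c m => simp [pvPass, go]

lemma hasO_nil : pvHasO [] = false := rfl
lemma hasO_hash (m : List Char) : pvHasO ('#' :: m) = false := by simp [pvHasO]
lemma hasO_O (m : List Char) : pvHasO ('O' :: m) = true := by simp [pvHasO]
lemma hasO_other {x : Char} (h1 : x ≠ '#') (h2 : x ≠ 'O') (m : List Char) :
    pvHasO (x :: m) = pvHasO m := by simp [pvHasO, h1, h2]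

lemma phi_nil (c : Nat) : pvPhi c [] = 0 := rfl
lemma phi_hash (c : Nat) (m : List Char) : pvPhi c ('#' :: m) = pvPhi 0 m := by simp [pvPhi]
lemma phi_O (c : Nat) (m : List Char) : pvPhi c ('O' :: m) = max c (pvPhi c m) := by
  simp [pvPhi]
lemma phi_other {x : Char} (h1 : x ≠ '#') (h2 : x ≠ 'O') (c : Nat) (m : List Char) :
    pvPhi c (x :: m) = pvPhi (c + 1) m := by simp [pvPhi, h1, h2]

lemma clear_O (m : List Char) : pvClear ('O' :: m) = '.' :: m := by simp [pvClear]
lemma clear_other {c : Char} (h : c ≠ 'O') (m : List Char) :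
    pvClear (c :: m) = '.' :: pvClear m := by simp [pvClear, h]

lemma load_nil (n i : Int) : pvLoad n i [] = 0 := rfl
lemma load_cons (n i : Int) (c : Char) (m : List Char) :
    pvLoad n i (c :: m) = (if c = 'O' then n - i else 0) + pvLoad n (i + 1) m := by
  simp [pvLoad]

lemma bf_nil (n i s : Int) : pvBF n i s [] = 0 := rfl
lemma bf_hash (n i s : Int) (m : List Char) :
    pvBF n i s ('#' :: m) = pvBF n (i + 1) (i + 1) m := by simp [pvBF]
lemma bf_O (n i s : Int) (m : List Char) :
    pvBF n i s ('O' :: m) = (n - s) + pvBF n (i + 1) (s + 1) m := by simp [pvBF]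
lemma bf_other {x : Char} (h1 : x ≠ '#') (h2 : x ≠ 'O') (n i s : Int) (m : List Char) :
    pvBF n i s (x :: m) = pvBF n (i + 1) s m := by simp [pvBF, h1, h2]

lemma settle_nil : pvSettle [] = [] := by rw [pvSettle]
lemma settle_hash (m : List Char) : pvSettle ('#' :: m) = '#' :: pvSettle m := by
  rw [pvSettle]; simp
lemma settle_O (m : List Char) : pvSettle ('O' :: m) = 'O' :: pvSettle m := by
  rw [pvSettle]; simp
lemma settle_other_hasO {x : Char} (h1 : x ≠ '#') (h2 : x ≠ 'O') {m : List Char}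
    (hm : pvHasO m = true) : pvSettle (x :: m) = 'O' :: pvSettle (pvClear m) := by
  rw [pvSettle]; simp [h1, h2, hm]
lemma settle_other_noO {x : Char} (h1 : x ≠ '#') (h2 : x ≠ 'O') {m : List Char}
    (hm : pvHasO m = false) : pvSettle (x :: m) = x :: pvSettle m := by
  rw [pvSettle]; simp [h1, h2, hm]

-- ---- bridge: A's index-based inner sweep equals pvPass ----
lemma pvAStep_zero (l : List Char) : pvAStep l 0 = l := by simp [pvAStep]

lemma pv_set_mid : ∀ (done : List Char) (h v : Char) (rest : List Char),
    (done ++ h :: rest).set done.length v = done ++ v :: rest := by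
  intro done
  induction done with
  | nil => intro h v rest; rfl
  | cons d ds ih => intro h v rest; simp [List.set, ih]

lemma pv_get_mid : ∀ (done : List Char) (h : Char) (rest : List Char),
    PySem.List.pyGet? (done ++ h :: rest) ((done.length : Nat) : Int) = some h := by
  intro done h rest
  exact PySem.List.pyGet?_append_length done rest h

lemma pvInner_inv : ∀ (rest done : List Char) (h : Char),
    (List.range' (done.length + 1) rest.length).foldl pvAStep (done ++ h :: rest)
      = done ++ pvGo h rest := by
  intro rest
  induction rest with
  | nil => intro done h; simp [pvGo]
  | cons c m ih =>
    intro done h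
    have hgi : PySem.List.pyGet? (done ++ h :: c :: m) (((done.length + 1 : Nat)) : Int)
        = some c := by
      have h2 : done ++ h :: c :: m = (done ++ [h]) ++ c :: m := by simp
      have h3 : ((done.length + 1 : Nat) : Int) = (((done ++ [h]).length : Nat) : Int) := by
        simp
      rw [h2, h3]
      exact pv_get_mid (done ++ [h]) c m
    have hgp : PySem.List.pyGet? (done ++ h :: c :: m) (((done.length + 1 : Nat) : Int) - 1)
        = some h := by
      have h3 : ((done.length + 1 : Nat) : Int) - 1 = ((done.length : Nat) : Int) := by
        push_cast; ring
      rw [h3]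
      exact pv_get_mid done h (c :: m)
    have hcond : (PySem.List.pyGet? (done ++ h :: c :: m) (((done.length + 1 : Nat)) : Int) = some 'O' ∧
        PySem.List.pyGet? (done ++ h :: c :: m) (((done.length + 1 : Nat) : Int) - 1) ≠ some '#' ∧
        PySem.List.pyGet? (done ++ h :: c :: m) (((done.length + 1 : Nat) : Int) - 1) ≠ some 'O' ∧
        done.length + 1 ≠ 0)
        ↔ (c = 'O' ∧ h ≠ '#' ∧ h ≠ 'O') := by
      rw [hgi, hgp]
      simp
    have hlen : (c :: m).length = m.length + 1 := by simp
    rw [hlen, List.range'_succ, List.foldl_cons]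
    by_cases hsw : c = 'O' ∧ h ≠ '#' ∧ h ≠ 'O'
    · have hstep : pvAStep (done ++ h :: c :: m) (done.length + 1) = done ++ 'O' :: '.' :: m := by
        unfold pvAStep
        rw [if_pos (hcond.mpr hsw)]
        have e1 : done.length + 1 - 1 = done.length := by omega
        rw [e1, pv_set_mid done h 'O' (c :: m)]
        have h2 : done ++ 'O' :: c :: m = (done ++ ['O']) ++ c :: m := by simp
        have h3 : done.length + 1 = (done ++ ['O']).length := by simp
        rw [h2, h3, pv_set_mid (done ++ ['O']) c '.' m]
        simp
      rw [hstep]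
      have h2 : done ++ 'O' :: '.' :: m = (done ++ ['O']) ++ '.' :: m := by simp
      have h3 : done.length + 1 + 1 = (done ++ ['O']).length + 1 := by simp
      rw [h2, h3, ih (done ++ ['O']) '.']
      simp [pvGo, hsw]
    · have hstep : pvAStep (done ++ h :: c :: m) (done.length + 1) = done ++ h :: c :: m := by
        unfold pvAStep
        rw [if_neg]
        intro hcon
        exact hsw (hcond.mp hcon)
      rw [hstep]
      have h2 : done ++ h :: c :: m = (done ++ [h]) ++ c :: m := by simp
      have h3 : done.length + 1 + 1 = (done ++ [h]).length + 1 := by simp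
      rw [h2, h3, ih (done ++ [h]) c]
      simp [pvGo, hsw]

lemma pvAInner_eq_pass (l : List Char) : pvAInner l = pvPass l := by
  cases l with
  | nil => rfl
  | cons c m =>
    unfold pvAInner
    rw [List.range_eq_range']
    simp only [List.length_cons]
    rw [List.range'_succ, List.foldl_cons, pvAStep_zero]
    have := pvInner_inv m [] c
    simpa [pvPass] using this

-- ---- outer loop = iterate ----
lemma foldl_const_iterate {α : Type} (f : α → α) :
    ∀ (n : Nat) (x : α), (List.range n).foldl (fun a _ => f a) x = f^[n] x := by
  intro n
  induction n with
  | zero => intro x; rfl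
  | succ k ih =>
    intro x
    rw [List.range_succ, List.foldl_append, ih]
    simp [Function.iterate_succ_apply']

-- ---- hasO facts ----
lemma hasO_pre_O : ∀ (pre : List Char), (∀ y ∈ pre, y ≠ '#' ∧ y ≠ 'O') →
    ∀ post, pvHasO (pre ++ 'O' :: post) = true := by
  intro pre
  induction pre with
  | nil => intro _ post; simp [hasO_O]
  | cons y p ih =>
    intro hall post
    have hy := hall y (by simp)
    simp only [List.cons_append]
    rw [hasO_other hy.1 hy.2]
    exact ih (fun z hz => hall z (by simp [hz])) post

lemma hasO_decomp : ∀ (m : List Char), pvHasO m = true →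
    ∃ pre post, m = pre ++ 'O' :: post ∧ ∀ y ∈ pre, y ≠ '#' ∧ y ≠ 'O' := by
  intro m
  induction m with
  | nil => intro h; simp [pvHasO] at h
  | cons c m' ih =>
    intro h
    by_cases hc : c = '#'
    · rw [hc, hasO_hash] at h; exact absurd h (by simp)
    · by_cases hO : c = 'O'
      · exact ⟨[], m', by simp [hO], by simp⟩
      · rw [hasO_other hc hO] at h
        obtain ⟨pre, post, heq, hall⟩ := ih h
        refine ⟨c :: pre, post, by simp [heq], ?_⟩
        intro y hy
        rcases List.mem_cons.mp hy with h1 | h2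
        · exact ⟨by rw [h1]; exact hc, by rw [h1]; exact hO⟩
        · exact hall y h2

lemma hasO_pass : ∀ (n : Nat) (l : List Char), l.length ≤ n → pvHasO (pvPass l) = pvHasO l := by
  intro n
  induction n with
  | zero =>
    intro l hl
    have : l = [] := List.length_eq_zero_iff.mp (by omega)
    subst this; rfl
  | succ k ih =>
    intro l hl
    match l with
    | [] => rfl
    | [x] => rw [pass_single]
    | x :: c :: m =>
      by_cases hx : x = '#'
      · subst hx; rw [pass_cons_hash, hasO_hash, hasO_hash]
      · by_cases hxO : x = 'O'
        · subst hxO; rw [pass_cons_O, hasO_O, hasO_O]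
        · by_cases hcO : c = 'O'
          · subst hcO
            rw [pass_swap hx hxO, hasO_other hx hxO, hasO_O, hasO_O]
          · rw [pass_skip hcO, hasO_other hx hxO, hasO_other hx hxO]
            exact ih (c :: m) (by simp at hl ⊢; omega)

-- ---- phi facts ----
lemma phi_mono : ∀ (l : List Char) (a b : Nat), a ≤ b → pvPhi a l ≤ pvPhi b l := by
  intro l
  induction l with
  | nil => intro a b _; simp [phi_nil]
  | cons c m ih =>
    intro a b hab
    by_cases h1 : c = '#'
    · subst h1; rw [phi_hash, phi_hash]
    · by_cases h2 : c = 'O'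
      · subst h2
        rw [phi_O, phi_O]
        have := ih a b hab
        omega
      · rw [phi_other h1 h2, phi_other h1 h2]
        exact ih (a + 1) (b + 1) (by omega)

lemma phi_le_len : ∀ (l : List Char) (c : Nat), pvPhi c l ≤ c + l.length := by
  intro l
  induction l with
  | nil => intro c; simp [phi_nil]
  | cons x m ih =>
    intro c
    by_cases h1 : x = '#'
    · subst h1; rw [phi_hash]
      have := ih 0; simp only [List.length_cons]; omega
    · by_cases h2 : x = 'O'
      · subst h2; rw [phi_O]
        have := ih c; simp only [List.length_cons]; omega
      · rw [phi_other h1 h2]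
        have := ih (c + 1); simp only [List.length_cons]; omega

lemma phi_hasO_false : ∀ (l : List Char), pvHasO l = false → ∀ a b, pvPhi a l = pvPhi b l := by
  intro l
  induction l with
  | nil => intro _ a b; rfl
  | cons c m ih =>
    intro h a b
    by_cases h1 : c = '#'
    · subst h1; rw [phi_hash, phi_hash]
    · by_cases h2 : c = 'O'
      · subst h2; rw [hasO_O] at h; exact absurd h (by simp)
      · rw [hasO_other h1 h2] at h
        rw [phi_other h1 h2, phi_other h1 h2]
        exact ih h (a + 1) (b + 1)

lemma phi_hasO_ge : ∀ (l : List Char), pvHasO l = true → ∀ c, c ≤ pvPhi c l := by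
  intro l
  induction l with
  | nil => intro h; rw [hasO_nil] at h; exact absurd h (by simp)
  | cons x m ih =>
    intro h c
    by_cases h1 : x = '#'
    · subst h1; rw [hasO_hash] at h; exact absurd h (by simp)
    · by_cases h2 : x = 'O'
      · subst h2; rw [phi_O]; omega
      · rw [hasO_other h1 h2] at h
        rw [phi_other h1 h2]
        have := ih h (c + 1); omega

lemma phi_pass : ∀ (n : Nat) (l : List Char), l.length ≤ n →
    ∀ c, pvPhi c (pvPass l) ≤ max c (pvPhi c l - 1) := by
  intro n
  induction n with
  | zero =>
    intro l hl c
    have : l = [] := List.length_eq_zero_iff.mp (by omega)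
    subst this; simp [pass_nil, phi_nil]
  | succ k ih =>
    intro l hl c
    match l with
    | [] => simp [pass_nil, phi_nil]
    | [x] =>
      rw [pass_single]
      by_cases h1 : x = '#'
      · subst h1; rw [phi_hash]; simp [phi_nil]
      · by_cases h2 : x = 'O'
        · subst h2; rw [phi_O]; simp [phi_nil]
        · rw [phi_other h1 h2]; simp [phi_nil]
    | x :: c' :: m =>
      have hlen : (c' :: m).length ≤ k := by simp at hl ⊢; omega
      by_cases h1 : x = '#'
      · subst h1
        rw [pass_cons_hash, phi_hash, phi_hash]
        have := ih (c' :: m) hlen 0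
        omega
      · by_cases h2 : x = 'O'
        · subst h2
          rw [pass_cons_O, phi_O, phi_O]
          have := ih (c' :: m) hlen c
          omega
        · by_cases h3 : c' = 'O'
          · subst h3
            rw [pass_swap h1 h2, phi_O, phi_other h1 h2, phi_O]
            have hIH := ih ('.' :: m) (by simp at hl ⊢; omega) c
            rw [phi_other (by decide : ('.' : Char) ≠ '#') (by decide : ('.' : Char) ≠ 'O')] at hIH
            omega
          · rw [pass_skip h3, phi_other h1 h2, phi_other h1 h2]
            by_cases hm : pvHasO (c' :: m) = true
            · -- first segment has a rock: phi is at least the counter, max absorbed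
              by_cases h4 : c' = '#'
              · subst h4; rw [hasO_hash] at hm; exact absurd hm (by simp)
              · have hm2 : pvHasO m = true := by rw [hasO_other h4 h3] at hm; exact hm
                have hge := phi_hasO_ge m hm2 (c + 1 + 1)
                have hIH := ih (c' :: m) hlen (c + 1)
                rw [phi_other h4 h3] at hIH
                rw [phi_other h4 h3]
                omega
            · -- no rock in the first segment: the counter is irrelevant
              have hm' : pvHasO (c' :: m) = false := by simpa using hm
              have hmp : pvHasO (pvPass (c' :: m)) = false := by
                rw [hasO_pass (c' :: m).length (c' :: m) le_rfl]; exact hm'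
              have heq1 : pvPhi (c + 1) (pvPass (c' :: m)) = pvPhi c (pvPass (c' :: m)) :=
                phi_hasO_false _ hmp (c + 1) c
              have heq2 : pvPhi (c + 1) (c' :: m) = pvPhi c (c' :: m) :=
                phi_hasO_false _ hm' (c + 1) c
              have hIH := ih (c' :: m) hlen c
              rw [heq1, heq2]
              omega

lemma phi_zero_settle : ∀ (n : Nat) (l : List Char), l.length ≤ n →
    pvPhi 0 l = 0 → pvSettle l = l := by
  intro n
  induction n with
  | zero =>
    intro l hl _
    have : l = [] := List.length_eq_zero_iff.mp (by omega)
    subst this; exact settle_nil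
  | succ k ih =>
    intro l hl hphi
    match l with
    | [] => exact settle_nil
    | x :: m =>
      have hlen : m.length ≤ k := by simp at hl; omega
      by_cases h1 : x = '#'
      · subst h1
        rw [phi_hash] at hphi
        rw [settle_hash, ih m hlen hphi]
      · by_cases h2 : x = 'O'
        · subst h2
          rw [phi_O] at hphi
          rw [settle_O, ih m hlen (by omega)]
        · rw [phi_other h1 h2] at hphi
          norm_num at hphi
          have hno : pvHasO m = false := by
            by_contra hcon
            have hT : pvHasO m = true := by simpa using hcon
            have := phi_hasO_ge m hT 1
            omega
          have hm0 : pvPhi 0 m = 0 := by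
            have := phi_mono m 0 1 (by omega)
            omega
          rw [settle_other_noO h1 h2 hno, ih m hlen hm0]

-- ---- chains of passable cells ----
lemma pvClear_decomp : ∀ (pre : List Char), (∀ y ∈ pre, y ≠ '#' ∧ y ≠ 'O') → ∀ post,
    pvClear (pre ++ 'O' :: post) = List.replicate (pre.length + 1) '.' ++ post := by
  intro pre
  induction pre with
  | nil => intro _ post; simp [clear_O]
  | cons y p ih =>
    intro hall post
    have hy := hall y (by simp)
    simp only [List.cons_append]
    rw [clear_other hy.2, ih (fun z hz => hall z (by simp [hz])) post]
    simp [List.replicate_succ]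

-- a rock jumps over the chain of passable cells one step per sweep
lemma pass_pre_O : ∀ (pre : List Char), pre ≠ [] → (∀ y ∈ pre, y ≠ '#' ∧ y ≠ 'O') →
    ∀ post, pvPass (pre ++ 'O' :: post) = pre.dropLast ++ 'O' :: pvPass ('.' :: post) := by
  intro pre
  induction pre with
  | nil => intro h; exact absurd rfl h
  | cons y p ih =>
    intro _ hall post
    have hy := hall y (by simp)
    cases p with
    | nil =>
      simp only [List.nil_append, List.cons_append]
      rw [pass_swap hy.1 hy.2]
      simp
    | cons z q =>
      have hz := hall z (by simp)
      have hstep : pvPass (y :: ((z :: q) ++ 'O' :: post)) = y :: pvPass ((z :: q) ++ 'O' :: post) := by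
        simp only [List.cons_append]
        exact pass_skip hz.2 y _
      have hih := ih (by simp) (fun w hw => hall w (by simp [List.mem_cons.mp hw])) post
      simp only [List.cons_append] at hstep hih ⊢
      rw [hstep, hih]
      have hd : (y :: z :: q).dropLast = y :: (z :: q).dropLast :=
        List.dropLast_cons_of_ne_nil (by simp)
      rw [hd]
      simp

lemma pass_dots : ∀ (k : Nat) (y : List Char),
    List.replicate k '.' ++ pvPass ('.' :: y) = pvPass (List.replicate k '.' ++ '.' :: y) := by
  intro k
  induction k with
  | zero => intro y; simp
  | succ j ih =>
    intro y
    rw [List.replicate_succ]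
    simp only [List.cons_append]
    have hshape : ∃ w, List.replicate j '.' ++ '.' :: y = '.' :: w := by
      cases j with
      | zero => exact ⟨y, by simp⟩
      | succ j' => exact ⟨List.replicate j' '.' ++ '.' :: y, by simp [List.replicate_succ]⟩
    obtain ⟨w, hw⟩ := hshape
    rw [hw, pass_skip (by decide), ← hw, ← ih y]

-- one sweep does not change the settled configuration
lemma settle_pass : ∀ (n : Nat) (l : List Char), l.length ≤ n →
    pvSettle (pvPass l) = pvSettle l := by
  intro n
  induction n with
  | zero =>
    intro l hl
    have : l = [] := List.length_eq_zero_iff.mp (by omega)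
    subst this; rfl
  | succ k ih =>
    intro l hl
    match l with
    | [] => rfl
    | [x] => rw [pass_single]
    | x :: c :: m =>
      have hlen : (c :: m).length ≤ k := by simp at hl ⊢; omega
      by_cases h1 : x = '#'
      · subst h1
        rw [pass_cons_hash, settle_hash, settle_hash, ih (c :: m) hlen]
      · by_cases h2 : x = 'O'
        · subst h2
          rw [pass_cons_O, settle_O, settle_O, ih (c :: m) hlen]
        · by_cases hm : pvHasO (c :: m) = true
          · -- the first segment after x has a rock
            obtain ⟨pre, post, heq, hall⟩ := hasO_decomp (c :: m) hm
            cases pre with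
            | nil =>
              -- the rock is adjacent to x
              simp only [List.nil_append] at heq
              injection heq with hcO hmeq
              subst hcO
              subst hmeq
              rw [pass_swap h1 h2, settle_O, settle_other_hasO h1 h2 hm, clear_O]
              exact congrArg _ (ih ('.' :: m) (by simpa using hlen))
            | cons z q =>
              -- rock further away: it passes one cell; induct on the rewritten list
              have hPall : ∀ y ∈ (x :: z :: q), y ≠ '#' ∧ y ≠ 'O' := by
                intro y hy
                rcases List.mem_cons.mp hy with h | h
                · exact ⟨by rw [h]; exact h1, by rw [h]; exact h2⟩
                · exact hall y (by simpa using h)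
              have hallP : ∀ y ∈ (z :: q), y ≠ '#' ∧ y ≠ 'O' := fun y hy =>
                hPall y (by simp [hy])
              have hallD : ∀ y ∈ (z :: q).dropLast, y ≠ '#' ∧ y ≠ 'O' := fun y hy =>
                hPall y (by simp [List.mem_of_mem_dropLast hy])
              have hhasO2 : pvHasO ((z :: q).dropLast ++ 'O' :: pvPass ('.' :: post)) = true :=
                hasO_pre_O _ hallD _
              have hlm : m.length = q.length + 1 + post.length := by
                have h := congrArg List.length heq
                simp at h
                omega
              have hdl : (z :: q).dropLast.length + 1 = (z :: q).length := by simp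
              have hrec : pvSettle (pvPass (List.replicate (z :: q).length '.' ++ '.' :: post))
                  = pvSettle (List.replicate (z :: q).length '.' ++ '.' :: post) := by
                apply ih
                simp only [List.length_append, List.length_replicate, List.length_cons]
                simp only [List.length_cons] at hl
                omega
              have hL : pvSettle (pvPass (x :: c :: m))
                  = 'O' :: pvSettle (List.replicate (z :: q).length '.' ++ '.' :: post) := by
                have hLeq : x :: c :: m = (x :: z :: q) ++ 'O' :: post := by simp [heq]
                rw [hLeq, pass_pre_O _ (by simp) hPall post]
                have hdrop : ((x :: z :: q).dropLast : List Char) ++ 'O' :: pvPass ('.' :: post)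
                    = x :: ((z :: q).dropLast ++ 'O' :: pvPass ('.' :: post)) := by
                  rw [List.dropLast_cons_of_ne_nil (by simp)]
                  simp
                rw [hdrop, settle_other_hasO h1 h2 hhasO2, pvClear_decomp _ hallD _, hdl,
                  pass_dots (z :: q).length post, hrec]
              have hR : pvSettle (x :: c :: m)
                  = 'O' :: pvSettle (List.replicate ((z :: q).length + 1) '.' ++ post) := by
                have hm2 : pvHasO ((z :: q) ++ 'O' :: post) = true := hasO_pre_O _ hallP _
                have h5 : (x :: c :: m) = x :: ((z :: q) ++ 'O' :: post) := by simp [heq]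
                rw [h5, settle_other_hasO h1 h2 hm2, pvClear_decomp _ hallP _]
              rw [hL, hR]
              have hrw : List.replicate (z :: q).length '.' ++ '.' :: post
                  = List.replicate ((z :: q).length + 1) '.' ++ post := by
                rw [List.replicate_succ']
                simp
              rw [hrw]
          · -- no rock in the first segment
            have hm' : pvHasO (c :: m) = false := by simpa using hm
            by_cases h3 : c = '#'
            · subst h3
              rw [pass_skip (by decide), pass_cons_hash]
              have hno2 : pvHasO ('#' :: pvPass m) = false := hasO_hash _
              rw [settle_other_noO h1 h2 hno2, settle_hash,
                settle_other_noO h1 h2 hm', settle_hash]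
              rw [ih m (by simp at hl; omega)]
            · by_cases h4 : c = 'O'
              · subst h4; rw [hasO_O] at hm'; exact absurd hm' (by simp)
              · rw [pass_skip h4]
                have hnop : pvHasO (pvPass (c :: m)) = false := by
                  rw [hasO_pass (c :: m).length (c :: m) le_rfl]; exact hm'
                rw [settle_other_noO h1 h2 hnop, settle_other_noO h1 h2 hm']
                rw [ih (c :: m) hlen]

-- enough sweeps reach the settled configuration
lemma iterate_pass_settle : ∀ (j : Nat) (l : List Char), pvPhi 0 l ≤ j →
    pvPass^[j] l = pvSettle l := by
  intro j
  induction j with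
  | zero =>
    intro l hphi
    simp only [Function.iterate_zero, id_eq]
    exact (phi_zero_settle l.length l le_rfl (by omega)).symm
  | succ k ih =>
    intro l hphi
    rw [Function.iterate_succ_apply]
    have h1 : pvPhi 0 (pvPass l) ≤ k := by
      have := phi_pass l.length l le_rfl 0
      omega
    rw [ih (pvPass l) h1]
    exact settle_pass l.length l le_rfl

lemma pvAOuter_eq_settle (l : List Char) : pvAOuter l = pvSettle l := by
  unfold pvAOuter
  rw [show pvAInner = pvPass from funext pvAInner_eq_pass]
  rw [foldl_const_iterate]
  apply iterate_pass_settle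
  have := phi_le_len l 0
  omega

-- ---- load of the settled line = B's single pass ----
lemma pvBF_noO : ∀ (m : List Char), pvHasO m = false → ∀ (n i s s' : Int),
    pvBF n i s m = pvBF n i s' m := by
  intro m
  induction m with
  | nil => intro _ n i s s'; rfl
  | cons c m' ih =>
    intro h n i s s'
    by_cases h1 : c = '#'
    · subst h1; rw [bf_hash, bf_hash]
    · by_cases h2 : c = 'O'
      · subst h2; rw [hasO_O] at h; exact absurd h (by simp)
      · rw [hasO_other h1 h2] at h
        rw [bf_other h1 h2, bf_other h1 h2]
        exact ih h n (i + 1) s s'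

lemma pvBF_dots : ∀ (k : Nat) (n i s : Int) (y : List Char),
    pvBF n i s (List.replicate k '.' ++ y) = pvBF n (i + k) s y := by
  intro k
  induction k with
  | zero => intro n i s y; simp
  | succ j ih =>
    intro n i s y
    rw [List.replicate_succ]
    simp only [List.cons_append]
    rw [bf_other (by decide) (by decide), ih]
    congr 1
    push_cast; ring

lemma pvBF_skip_others : ∀ (pre : List Char), (∀ y ∈ pre, y ≠ '#' ∧ y ≠ 'O') →
    ∀ (n i s : Int) (y : List Char),
    pvBF n i s (pre ++ y) = pvBF n (i + pre.length) s y := by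
  intro pre
  induction pre with
  | nil => intro _ n i s y; simp
  | cons c p ih =>
    intro hall n i s y
    have hc := hall c (by simp)
    simp only [List.cons_append]
    rw [bf_other hc.1 hc.2, ih (fun z hz => hall z (by simp [hz])) n (i + 1) s y]
    congr 1
    simp only [List.length_cons]
    push_cast; ring

lemma load_settle : ∀ (nn : Nat) (l : List Char), l.length ≤ nn → ∀ (n i : Int),
    pvLoad n i (pvSettle l) = pvBF n i i l := by
  intro nn
  induction nn with
  | zero =>
    intro l hl n i
    have : l = [] := List.length_eq_zero_iff.mp (by omega)
    subst this; rw [settle_nil, load_nil, bf_nil]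
  | succ k ih =>
    intro l hl n i
    match l with
    | [] => rw [settle_nil, load_nil, bf_nil]
    | x :: m =>
      have hlen : m.length ≤ k := by simp at hl; omega
      by_cases h1 : x = '#'
      · subst h1
        rw [settle_hash, load_cons, bf_hash, ih m hlen n (i + 1)]
        simp
      · by_cases h2 : x = 'O'
        · subst h2
          rw [settle_O, load_cons, bf_O, ih m hlen n (i + 1)]
          simp
        · by_cases hm : pvHasO m = true
          · obtain ⟨pre, post, heq, hall⟩ := hasO_decomp m hm
            rw [settle_other_hasO h1 h2 hm, heq, pvClear_decomp _ hall _]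
            rw [load_cons, if_pos rfl]
            have hlen2 : (List.replicate (pre.length + 1) '.' ++ post).length ≤ k := by
              have hlm := congrArg List.length heq
              simp only [List.length_append, List.length_cons] at hlm
              simp only [List.length_append, List.length_replicate]
              simp only [List.length_cons] at hl
              omega
            rw [ih _ hlen2 n (i + 1), pvBF_dots]
            -- right-hand side
            rw [bf_other h1 h2, pvBF_skip_others _ hall, bf_O]
            have harith : (i + 1 + ((pre.length + 1 : Nat) : Int)) = (i + 1 + (pre.length : Int) + 1) := by
              push_cast; ring
            rw [harith]
          · have hm' : pvHasO m = false := by simpa using hm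
            rw [settle_other_noO h1 h2 hm', load_cons, if_neg h2, bf_other h1 h2,
              ih m hlen n (i + 1), pvBF_noO m hm' n (i + 1) (i + 1) i]
            simp

-- ---- bridges from the ports' folds over enumerate ----
lemma loadFold (n : Int) : ∀ (l : List Char) (i a : Int),
    (PySem.List.enumerate l i).foldl
      (fun acc p => if p.2 = 'O' then acc + (n - p.1) else acc) a
    = a + pvLoad n i l := by
  intro l
  induction l with
  | nil => intro i a; simp [PySem.List.enumerate_nil, load_nil]
  | cons c m ih =>
    intro i a
    rw [PySem.List.enumerate_cons]
    simp only [List.foldl_cons]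
    by_cases hc : c = 'O'
    · simp only [hc, if_true, eq_self_iff_true]
      rw [ih (i + 1) (a + (n - i)), load_cons, if_pos (rfl : ('O' : Char) = 'O')]
      ring
    · simp only [hc, if_false]
      rw [ih (i + 1) a, load_cons, if_neg hc]
      ring

lemma bFold (n : Int) : ∀ (l : List Char) (i t s : Int),
    ((PySem.List.enumerate l i).foldl
      (fun st p =>
        if p.2 = '#' then (st.1, p.1 + 1)
        else if p.2 = 'O' then (st.1 + (n - st.2), st.2 + 1)
        else st) ((t, s) : Int × Int)).1
    = t + pvBF n i s l := by
  intro l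
  induction l with
  | nil => intro i t s; simp [PySem.List.enumerate_nil, bf_nil]
  | cons c m ih =>
    intro i t s
    rw [PySem.List.enumerate_cons]
    simp only [List.foldl_cons]
    by_cases h1 : c = '#'
    · simp only [h1, if_true, eq_self_iff_true]
      rw [ih (i + 1) t (i + 1), bf_hash]
    · by_cases h2 : c = 'O'
      · simp only [h2, if_true]
        rw [if_neg (by decide : ¬('O' : Char) = '#')]
        rw [ih (i + 1) (t + (n - s)) (s + 1), bf_O]
        ring
      · simp only [h1, h2, if_false]
        rw [ih (i + 1) t s, bf_other h1 h2]

lemma length_settle (l : List Char) : (pvSettle l).length = l.length := by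
  rw [← pvAOuter_eq_settle]
  unfold pvAOuter
  have hgen : ∀ (ns : List Nat) (x : List Char),
      (ns.foldl (fun acc _ => pvAInner acc) x).length = x.length := by
    intro ns
    induction ns with
    | nil => intro x; rfl
    | cons a as ihh =>
      intro x
      simp only [List.foldl_cons]
      rw [ihh, pvAInner_eq_pass, pass_length]
  exact hgen _ l

-- ===== VERDICT (by name: the statement is the Claim_ definition above) =====
theorem count_number_of_total_load_in_line_spec : Claim_equal_count_number_of_total_load_in_line := by
  intro s _
  unfold Spec_count_number_of_total_load_in_line
  unfold count_number_of_total_load_in_line count_number_of_total_load_in_line_alt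
  simp only []
  rw [pvAOuter_eq_settle, loadFold, bFold, length_settle]
  rw [load_settle s.toList.length s.toList le_rfl]
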